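-- pv_equiv track=rewrite | github.com/somekindofpast/py-bites-regular-bites | queue/reverse_only_letters.py | reverse_letters
-- ===== SOURCE A (Python) =====
-- from collections import deque
-- from string import ascii_letters
--
-- def reverse_letters(string: str) -> str:
--     """Reverse letters in a string but keep the order of the non-letters the same"""
--     queue = deque([c for c in string if c in ascii_letters])
--     result = ""
--     for c in string:
--         if c in ascii_letters:
--             result += queue.pop()
--         else:
--             result += c
--     return result
-- ===== SOURCE B (Python) =====
-- from collections import deque
-- from string import ascii_letters
--
--
-- def reverse_letters(string: str) -> str:
--     """Reverse letters in a string but keep the order of the non-letters the same.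
--
--     Two-ended consumption: eat the string inward from both ends, keeping
--     non-letters in place and swapping the boundary letters, instead of
--     collecting all letters first and refilling.
--     """
--     d = deque(string)
--     pre = []
--     suf = []
--     while len(d) > 1:
--         if d[0] not in ascii_letters:
--             pre.append(d.popleft())
--         elif d[-1] not in ascii_letters:
--             suf.append(d.pop())
--         else:
--             a = d.popleft()
--             b = d.pop()
--             pre.append(b)
--             suf.append(a)
--     pre.extend(d)
--     suf.reverse()
--     return "".join(pre) + "".join(suf)
-- ===== Notes on version B (the rewrite author's own statement) =====
-- stated objective: alternative
-- what changed: Instead of collecting all letters into a queue and refilling the string in a second pass, B consumes the string inward from both ends at once, keeping non-letters in place and swapping the two boundary letters (two-pointer scheme).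
import Mathlib
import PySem

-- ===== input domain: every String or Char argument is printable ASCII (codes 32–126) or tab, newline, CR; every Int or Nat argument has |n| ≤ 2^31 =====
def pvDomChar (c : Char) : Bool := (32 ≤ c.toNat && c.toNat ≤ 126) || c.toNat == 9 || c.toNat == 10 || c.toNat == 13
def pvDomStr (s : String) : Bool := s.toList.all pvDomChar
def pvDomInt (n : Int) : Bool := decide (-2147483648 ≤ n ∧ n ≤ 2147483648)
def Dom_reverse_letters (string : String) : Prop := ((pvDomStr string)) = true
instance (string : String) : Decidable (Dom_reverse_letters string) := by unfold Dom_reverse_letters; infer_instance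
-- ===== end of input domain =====

-- B replaces A's two-pass "collect letters into a queue, then refill" with a single
-- inward two-ended sweep that keeps non-letters in place and swaps boundary letters.

-- `c in ascii_letters` (exact: ascii_letters is exactly a-z and A-Z)
def isL (c : Char) : Bool := ('a' ≤ c && c ≤ 'z') || ('A' ≤ c && c ≤ 'Z')

-- ===== PORT A =====
-- `for c in string: result += queue.pop() / c`; queue.pop (right end) never hits an
-- empty queue in Python (one letter queued per letter seen), so getLastD's default is never used.
def loopA (cs q res : List Char) : List Char :=
  match cs with
  | [] => res
  | c :: cs' => if isL c then loopA cs' q.dropLast (res ++ [q.getLastD ' '])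
                else loopA cs' q (res ++ [c])

def reverse_letters (string : String) : String :=
  String.ofList (loopA string.toList (string.toList.filter isL) [])

-- ===== PORT B =====
-- Source B's while-loop over the deque: popleft = head/tail, pop = getLast/dropLast;
-- the deque always has ≥ 2 elements inside the loop, so the D defaults are never used.
def bloop (d pre suf : List Char) : List Char :=
  if d.length ≤ 1 then (pre ++ d) ++ suf.reverse
  else if ¬ isL (d.headD ' ') then bloop d.tail (pre ++ [d.headD ' ']) suf
  else if ¬ isL (d.getLastD ' ') then bloop d.dropLast pre (suf ++ [d.getLastD ' '])
  else bloop d.dropLast.tail (pre ++ [d.getLastD ' ']) (suf ++ [d.headD ' '])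
termination_by d.length
decreasing_by
  · simp [List.length_tail]; omega
  · simp [List.length_dropLast]; omega
  · simp [List.length_tail, List.length_dropLast]; omega

def reverse_letters_alt (string : String) : String :=
  String.ofList (bloop string.toList [] [])

-- ===== PRECONDITION & SPEC =====
def Spec_reverse_letters (string : String) (out : String) : Prop := out = reverse_letters_alt string
instance (string : String) (out : String) : Decidable (Spec_reverse_letters string out) := by unfold Spec_reverse_letters; infer_instance

-- ===== CLAIM (what is proved, stated in full; the proofs are below) =====
def Claim_equal_reverse_letters : Prop := ∀ (string : String), Dom_reverse_letters string → Spec_reverse_letters string (reverse_letters string)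

-- ===== LEMMAS AND PROOFS =====

-- Common meeting point: fill `cs` from the front of `r` at letter positions,
-- returning the filled list and the unconsumed rest of `r`.
def fillR : List Char → List Char → List Char × List Char
  | [], r => ([], r)
  | c :: cs, r =>
      if isL c then ((r.headD ' ') :: (fillR cs r.tail).1, (fillR cs r.tail).2)
      else (c :: (fillR cs r).1, (fillR cs r).2)

def Fspec (cs : List Char) : List Char := (fillR cs ((cs.filter isL).reverse)).1

theorem dropLast_reverse' (l : List Char) : l.reverse.dropLast = l.tail.reverse := by
  cases l with
  | nil => rfl
  | cons a t => simp

theorem getLastD_reverse' (l : List Char) (d : Char) : l.reverse.getLastD d = l.headD d := by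
  cases l with
  | nil => rfl
  | cons a t => simp [List.getLastD_eq_getLast?]

theorem loopA_eq (cs : List Char) : ∀ r res, loopA cs r.reverse res = res ++ (fillR cs r).1 := by
  induction cs with
  | nil => intro r res; simp [loopA, fillR]
  | cons c cs ih =>
      intro r res
      by_cases h : isL c
      · simp only [loopA, fillR, h, if_true]
        rw [dropLast_reverse', getLastD_reverse', ih]
        simp
      · simp only [loopA, fillR, h]
        rw [ih]; simp

theorem fillR_append (xs : List Char) : ∀ ys r, fillR (xs ++ ys) r =
    ((fillR xs r).1 ++ (fillR ys (fillR xs r).2).1, (fillR ys (fillR xs r).2).2) := by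
  induction xs with
  | nil => intro ys r; simp [fillR]
  | cons c xs ih =>
      intro ys r
      by_cases h : isL c <;> simp [fillR, h, ih]

theorem fillR_consume (xs : List Char) : ∀ R s, (xs.filter isL).length = R.length →
    fillR xs (R ++ s) = ((fillR xs R).1, s) := by
  induction xs with
  | nil =>
      intro R s h
      have : R = [] := by
        cases R with
        | nil => rfl
        | cons a t => simp [List.filter] at h
      subst this; simp [fillR]
  | cons c xs ih =>
      intro R s h
      by_cases hc : isL c
      · cases R with
        | nil => simp [List.filter, hc] at h
        | cons a R' =>
            simp only [List.filter, hc] at h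
            simp only [fillR, hc, if_true, List.cons_append, List.tail_cons, List.headD_cons]
            rw [ih R' s (by simpa using h)]
      · simp only [List.filter, hc] at h
        simp only [fillR, hc]
        rw [ih R s (by simpa [List.filter, hc] using h)]
        simp

theorem fillR_consume_all (xs R : List Char) (h : (xs.filter isL).length = R.length) :
    (fillR xs R).2 = [] := by
  have h2 := congrArg Prod.snd (fillR_consume xs R [] h)
  simpa using h2

theorem Fspec_small (d : List Char) (h : d.length ≤ 1) : Fspec d = d := by
  match d with
  | [] => rfl
  | [c] =>
      by_cases hc : isL c <;> simp [Fspec, fillR, List.filter, hc]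
  | a :: b :: t => simp at h

theorem Fspec_cons_nonletter (c : Char) (t : List Char) (h : ¬ isL c) :
    Fspec (c :: t) = c :: Fspec t := by
  simp [Fspec, fillR, h]

theorem Fspec_concat_nonletter (ys : List Char) (b : Char) (h : ¬ isL b) :
    Fspec (ys ++ [b]) = Fspec ys ++ [b] := by
  unfold Fspec
  rw [List.filter_append]
  have hb : List.filter isL [b] = [] := by simp [List.filter, h]
  rw [hb, List.append_nil, fillR_append]
  have h2 := fillR_consume_all ys ((ys.filter isL).reverse) (by simp)
  simp [h2, fillR, h]

theorem Fspec_both (c : Char) (m : List Char) (b : Char) (hc : isL c) (hb : isL b) :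
    Fspec (c :: (m ++ [b])) = b :: Fspec m ++ [c] := by
  unfold Fspec
  have hf : List.filter isL (c :: (m ++ [b])) = c :: (m.filter isL ++ [b]) := by
    simp [List.filter_append, hc, hb, List.filter]
  rw [hf]
  have hr : (c :: (m.filter isL ++ [b])).reverse = b :: ((m.filter isL).reverse ++ [c]) := by
    simp
  rw [hr]
  simp only [fillR, hc, List.headD_cons, List.tail_cons]
  rw [fillR_append, fillR_consume m ((m.filter isL).reverse) [c] (by simp)]
  simp [fillR, hb]

theorem bloop_eq (d pre suf : List Char) : bloop d pre suf = (pre ++ Fspec d) ++ suf.reverse := by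
  induction d, pre, suf using bloop.induct with
  | case1 d pre suf h =>
      rw [bloop]
      simp [h, Fspec_small d h]
  | case2 d pre suf h1 h2 ih =>
      have hne : d ≠ [] := by intro hd; subst hd; simp at h1
      obtain ⟨c, t, rfl⟩ := List.exists_cons_of_ne_nil hne
      simp only [List.headD_cons] at h2
      simp only [List.headD_cons, List.tail_cons] at ih
      rw [bloop, if_neg h1]
      rw [if_pos (by simpa using h2)]
      rw [List.headD_cons, List.tail_cons, ih, Fspec_cons_nonletter c t (by simpa using h2)]
      simp
  | case3 d pre suf h1 h2 h3 ih =>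
      have hne : d ≠ [] := by intro hd; subst hd; simp at h1
      obtain ⟨ys, b, rfl⟩ : ∃ ys b, d = ys ++ [b] :=
        ⟨d.dropLast, d.getLast hne, (List.dropLast_append_getLast hne).symm⟩
      have hlast : (ys ++ [b]).getLastD ' ' = b := by
        simp [List.getLastD_eq_getLast?]
      have hdl : (ys ++ [b]).dropLast = ys := List.dropLast_concat
      rw [hlast] at h3 ih
      rw [hdl] at ih
      rw [bloop, if_neg h1, if_neg h2, hlast, hdl, if_pos h3]
      rw [ih, Fspec_concat_nonletter ys b (by simpa using h3)]
      simp
  | case4 d pre suf h1 h2 h3 ih =>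
      have hne : d ≠ [] := by intro hd; subst hd; simp at h1
      obtain ⟨c, t, rfl⟩ := List.exists_cons_of_ne_nil hne
      have htne : t ≠ [] := by intro hd; subst hd; simp at h1
      obtain ⟨m, b, rfl⟩ : ∃ m b, t = m ++ [b] :=
        ⟨t.dropLast, t.getLast htne, (List.dropLast_append_getLast htne).symm⟩
      have hcc : isL c = true := by
        by_contra h
        exact h2 (by simpa using h)
      have hsplit : c :: (m ++ [b]) = (c :: m) ++ [b] := by simp
      have hlast : (c :: (m ++ [b])).getLastD ' ' = b := by
        rw [hsplit, List.getLastD_eq_getLast?, List.getLast?_concat]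
        rfl
      have hb : isL b = true := by
        by_contra h
        rw [hlast] at h3
        exact h3 (by simpa using h)
      have hdlt : (c :: (m ++ [b])).dropLast.tail = m := by
        rw [hsplit, List.dropLast_concat, List.tail_cons]
      have h3' : ¬(¬ isL b = true) := by rw [hlast] at h3; exact h3
      rw [hlast] at ih
      rw [hdlt] at ih
      simp only [List.headD_cons] at ih
      rw [bloop, if_neg h1, if_neg h2, hlast, if_neg h3', hdlt, List.headD_cons]
      rw [ih, Fspec_both c m b hcc hb]
      simp

theorem reverse_letters_spec' (s : String) : reverse_letters s = reverse_letters_alt s := by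
  unfold reverse_letters reverse_letters_alt
  rw [bloop_eq]
  have h := loopA_eq s.toList ((s.toList.filter isL).reverse) []
  rw [List.reverse_reverse] at h
  rw [h]
  simp [Fspec]

-- ===== VERDICT (by name: the statement is the Claim_ definition above) =====
theorem reverse_letters_spec : Claim_equal_reverse_letters := by
  intro s _
  unfold Spec_reverse_letters
  exact reverse_letters_spec' s
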